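-- pv_equiv track=rewrite | github.com/adityavkk/Sandbox | problems/Misc/amortized-analysis/max-min.py | f
-- ===== SOURCE A (Python) =====
-- from functools import reduce
--
-- class SlidingWindowChain:
--
--     """augmented list with insert and delete that maintains a sorted and max size invariant"""
--
--     def __init__(self, window_size, first_window, maxChain = False):
--         self.maxChain = maxChain
--         def g(xs, x):
--             if not len(xs):
--                 return [x]
--             last = xs[-1][1]
--             if (self.maxChain and x[1] > last) or (not self.maxChain and x[1] < last):
--                 xs.append(x)
--             return xs
--         self.data = reduce(g, reversed(first_window), [])
--         self.last_index = None
--         self.window_size = window_size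
--
--     def insert(self, x, i):
--         if i - self.window_size == self.last_index:
--             if len(self.data):
--                 self.data.pop()
--         self.data = [y for y in self.data if y[1] > x] if self.maxChain \
--                     else [y for y in self.data if y[1] < x]
--         self.data.insert(0, (i, x))
--         self.last_index = self.data[-1][0]
--         return self
--
--     def get(self):
--         return self.data[-1][1] if len(self.data) else None
--
-- def f(ns, k):
--     """
--     >>> f([1, 2, 3, 4, 10, 20, 30, 40, 100, 200], 4)
--     3
--     >>> f(ns1, k1)
--     290
--     """
--     first_window = list(enumerate(ns[:k]))
--     full_length = len(ns)
--     min_sw = SlidingWindowChain(k, first_window)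
--     max_sw = SlidingWindowChain(k, first_window, True)
--     ns = ns[k:]
--     def g(sw_mins, ni):
--         (sw, mins) = sw_mins
--         (i, n) = ni
--         if i >= full_length - k:
--             return (sw, mins)
--         sw.insert(n, i + k)
--         mins.append(sw.get())
--         return (sw, mins)
--     mins = reduce(g, enumerate(ns), (min_sw, [min_sw.get()]))[1]
--     maxes = reduce(g, enumerate(ns), (max_sw, [max_sw.get()]))[1]
--     return min([maxes[i] - mins[i] for i in range(0, len(mins))])
-- ===== SOURCE B (Python) =====
-- def f(ns, k):
--     n = len(ns)
--     def reported(better):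
--         # index chain, oldest first; ns[chain[head]] is the current window extremum
--         pre = []
--         for j in reversed(range(min(k, n))):
--             if not pre or better(ns[j], ns[pre[-1]]):
--                 pre.append(j)
--         chain = pre[::-1]
--         head = 0
--         last = None
--         out = [ns[chain[head]]]
--         for i in range(k, n):
--             if head < len(chain) and i - k == last:
--                 head += 1
--             while len(chain) > head and not better(ns[chain[-1]], ns[i]):
--                 chain.pop()
--             chain.append(i)
--             last = chain[head]
--             out.append(ns[chain[head]])
--         return out
--     mins = reported(lambda a, b: a < b)
--     maxs = reported(lambda a, b: a > b)
--     return min(x - y for x, y in zip(maxs, mins))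
-- ===== Notes on version B (the rewrite author's own statement) =====
-- stated objective: faster
-- what changed: Replaces the reduce-driven SlidingWindowChain class, which rebuilds its whole chain list by a filter comprehension on every insert (quadratic on monotone runs), with a single-pass array-backed monotonic index deque (head pointer for evictions, amortized end pops) computing the same reported window extrema; Pre_ excludes empty lists and k < 1, where A raises TypeError or (for negative k) returns an accident of negative-slice semantics while B raises IndexError.
-- outside the precondition, e.g. on f([1, 2], -1): A returns 0, B raises IndexError
import Mathlib
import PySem

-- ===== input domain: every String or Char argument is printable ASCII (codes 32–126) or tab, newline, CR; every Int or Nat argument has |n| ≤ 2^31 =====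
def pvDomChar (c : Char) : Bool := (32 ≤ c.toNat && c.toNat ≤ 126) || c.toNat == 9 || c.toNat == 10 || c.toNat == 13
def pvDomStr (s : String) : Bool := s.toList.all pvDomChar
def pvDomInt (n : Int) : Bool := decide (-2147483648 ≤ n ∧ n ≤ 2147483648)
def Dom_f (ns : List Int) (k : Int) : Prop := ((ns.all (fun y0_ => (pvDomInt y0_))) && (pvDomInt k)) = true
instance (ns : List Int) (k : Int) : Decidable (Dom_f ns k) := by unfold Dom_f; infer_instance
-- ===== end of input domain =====

-- B replaces A's reduce-driven chain class, which rebuilds its list by a filter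
-- comprehension on every insert, with a single-pass array-backed monotonic index deque
-- (head pointer for evictions, end pops for displaced values) computing the same values.

-- ===== PORT A =====
-- the append/keep test "(self.maxChain and v > last) or (not self.maxChain and v < last)"
def fBetter (mx : Bool) (v last : Int) : Bool :=
  (mx && decide (last < v)) || (!mx && decide (v < last))

-- __init__'s g: append x at the end when it beats xs[-1]
def fInitStep (mx : Bool) (xs : List (Int × Int)) (x : Int × Int) : List (Int × Int) :=
  match xs.getLast? with
  | none => [x]
  | some last => if fBetter mx x.2 last.2 then xs ++ [x] else xs

-- self.data = reduce(g, reversed(first_window), [])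
def fChainInit (mx : Bool) (fw : List (Int × Int)) : List (Int × Int) :=
  fw.reverse.foldl (fInitStep mx) []

-- insert(x, i) on state (data, last_index)
def fInsert (mx : Bool) (ws : Int) (st : List (Int × Int) × Option Int) (x i : Int) :
    List (Int × Int) × Option Int :=
  let d0 := if some (i - ws) = st.2 then (if st.1 ≠ [] then st.1.dropLast else st.1) else st.1
  let d1 := d0.filter (fun y => fBetter mx y.2 x)
  let d2 := (i, x) :: d1
  (d2, d2.getLast?.map Prod.fst)

-- get(): data[-1][1] if data else None
def fGet (data : List (Int × Int)) : Option Int := data.getLast?.map Prod.snd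

-- f's inner g on state ((data, last_index), mins)
def fStep (mx : Bool) (fullLen ws : Int)
    (st : (List (Int × Int) × Option Int) × List (Option Int)) (ni : Int × Int) :
    (List (Int × Int) × Option Int) × List (Option Int) :=
  if ni.1 ≥ fullLen - ws then st
  else
    let sw := fInsert mx ws st.1 ni.2 (ni.1 + ws)
    (sw, st.2 ++ [fGet sw.1])

def f (ns : List Int) (k : Int) : Int :=
  let firstWindow := PySem.List.enumerate (PySem.List.slice ns none (some k)) 0
  let fullLength : Int := ns.length
  let minInit := fChainInit false firstWindow
  let maxInit := fChainInit true firstWindow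
  let tail := PySem.List.slice ns (some k) none
  let mins := ((PySem.List.enumerate tail 0).foldl (fStep false fullLength k)
      ((minInit, none), [fGet minInit])).2
  let maxes := ((PySem.List.enumerate tail 0).foldl (fStep true fullLength k)
      ((maxInit, none), [fGet maxInit])).2
  -- maxes[i] - mins[i]: '.getD 0' is only reached where Python raises TypeError (None), outside Pre_f
  let diffs := (PySem.List.pyRange 0 (mins.length : Int) 1).map (fun i =>
      (PySem.List.pyGetD maxes i none).getD 0 - (PySem.List.pyGetD mins i none).getD 0)
  -- min(diffs): '.getD 0' only where Python raises ValueError (empty), unreachable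
  (PySem.List.min? diffs (fun y => y)).getD 0

-- ===== PORT B =====
-- B's two comparison lambdas: 'lambda a, b: a < b' (minima) and 'lambda a, b: a > b' (maxima)
def fAltBetter (mx : Bool) (a b : Int) : Bool := if mx then decide (b < a) else decide (a < b)

-- ns[j]: '.getD 0' is only reached on an out-of-range index, where Python raises
-- IndexError; all indices B stores are in range inside Pre_f
def fAltVal (ns : List Int) (j : Int) : Int := (PySem.List.pyGet? ns j).getD 0

-- 'if not pre or better(ns[j], ns[pre[-1]]): pre.append(j)'
def fAltPreStep (ns : List Int) (mx : Bool) (pre : List Int) (j : Int) : List Int :=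
  match pre.getLast? with
  | none => pre ++ [j]
  | some l => if fAltBetter mx (fAltVal ns j) (fAltVal ns l) then pre ++ [j] else pre

-- 'while len(chain) > head and not better(ns[chain[-1]], ns[i]): chain.pop()'
-- ('chain ≠ []' only makes the recursion total; in Python len(chain) > head ≥ 0 implies it)
def fAltPop (ns : List Int) (mx : Bool) (x head : Int) (chain : List Int) : List Int :=
  if h : chain ≠ [] ∧ head < (chain.length : Int) ∧
      fAltBetter mx (fAltVal ns ((PySem.List.pyGet? chain (-1)).getD 0)) x = false then
    fAltPop ns mx x head chain.dropLast
  else chain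
termination_by chain.length
decreasing_by
  rw [List.length_dropLast]
  have : chain.length ≠ 0 := fun hc => h.1 (List.eq_nil_of_length_eq_zero hc)
  omega

-- the loop body on state (chain, head, last, out)
def fAltStep (ns : List Int) (k : Int) (mx : Bool)
    (st : List Int × Int × Option Int × List Int) (i : Int) :
    List Int × Int × Option Int × List Int :=
  let h1 := if st.2.1 < (st.1.length : Int) ∧ st.2.2.1 = some (i - k) then st.2.1 + 1 else st.2.1
  let c1 := fAltPop ns mx (fAltVal ns i) h1 st.1
  let c2 := c1 ++ [i]
  let newLast := (PySem.List.pyGet? c2 h1).getD 0   -- chain[head]; in range inside Pre_f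
  (c2, h1, some newLast, st.2.2.2 ++ [fAltVal ns newLast])

-- reported(better): the per-window extrema A's chain reports, one pass
def fAltReported (ns : List Int) (k : Int) (mx : Bool) : List Int :=
  let n : Int := ns.length
  let pre := ((PySem.List.pyRange 0 (min k n) 1).reverse).foldl (fAltPreStep ns mx) []
  let chain := pre.reverse
  ((PySem.List.pyRange k n 1).foldl (fAltStep ns k mx)
    (chain, 0, none, [fAltVal ns ((PySem.List.pyGet? chain 0).getD 0)])).2.2.2

def f_alt (ns : List Int) (k : Int) : Int :=
  let mins := fAltReported ns k false
  let maxs := fAltReported ns k true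
  -- min(x - y for x, y in zip(maxs, mins)): '.getD 0' only on empty, unreachable inside Pre_f
  (PySem.List.min? ((maxs.zip mins).map (fun p => p.1 - p.2)) (fun y => y)).getD 0

-- ===== PRECONDITION & SPEC =====
-- Pre_f excludes ns = [] and k ≤ 0: for k = 0 or ns = [] A raises TypeError (None - None);
-- for k < 0 A's value is an accident of Python negative-slice semantics (a window size
-- must be positive for this task) and B itself raises IndexError on the empty chain there.
def Pre_f (ns : List Int) (k : Int) : Prop := ns ≠ [] ∧ 1 ≤ k
instance (ns : List Int) (k : Int) : Decidable (Pre_f ns k) := by unfold Pre_f; infer_instance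
def pvWitness_f : List Int × Int := ([1, 5, 3], 2)

def Spec_f (ns : List Int) (k : Int) (out : Int) : Prop := out = f_alt ns k
instance (ns : List Int) (k : Int) (out : Int) : Decidable (Spec_f ns k out) := by
  unfold Spec_f; infer_instance

-- ===== CLAIM (what is proved, stated in full; the proofs are below) =====
def Claim_equal_f : Prop :=
  ∀ (ns : List Int) (k : Int), Dom_f ns k → Pre_f ns k → Spec_f ns k (f ns k)

-- ===== LEMMAS AND PROOFS =====

-- the pair B's index j stands for in A's chain
def pj (ns : List Int) (j : Int) : Int × Int := (j, fAltVal ns j)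

-- fBetter is a strict order in both modes, and fAltBetter is the same test
theorem fBetter_trans {mx : Bool} {a b c : Int} (h1 : fBetter mx a b = true)
    (h2 : fBetter mx b c = true) : fBetter mx a c = true := by
  cases mx <;> simp [fBetter] at * <;> omega

theorem fAltBetter_eq (mx : Bool) (a b : Int) : fAltBetter mx a b = fBetter mx a b := by
  cases mx <;> simp [fAltBetter, fBetter]

-- ===== the initial chain: A's reduce over pairs is B's pre-fold over indices =====

theorem init_sim (mx : Bool) (ns : List Int) (js : List Int) (pre : List Int) :
    (js.map (pj ns)).foldl (fInitStep mx) (pre.map (pj ns)) =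
      (js.foldl (fAltPreStep ns mx) pre).map (pj ns) := by
  induction js generalizing pre with
  | nil => rfl
  | cons j js ih =>
    rw [List.map_cons, List.foldl_cons, List.foldl_cons]
    have hstep : fInitStep mx (pre.map (pj ns)) (pj ns j) =
        (fAltPreStep ns mx pre j).map (pj ns) := by
      rcases hL : pre.getLast? with _ | l
      · have hpre : pre = [] := List.getLast?_eq_none_iff.mp hL
        subst hpre
        simp [fInitStep, fAltPreStep]
      · have hLm : (pre.map (pj ns)).getLast? = some (pj ns l) := by
          rw [List.getLast?_map, hL]; rfl
        cases hb : fBetter mx (fAltVal ns j) (fAltVal ns l) <;>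
          simp [fInitStep, fAltPreStep, hL, hLm, pj, fAltBetter_eq, hb]
    rw [hstep, ih]

-- the pre-list is never empty once an index went in
theorem preStep_ne_nil (ns : List Int) (mx : Bool) (pre : List Int) (j : Int) :
    fAltPreStep ns mx pre j ≠ [] := by
  rcases hL : pre.getLast? with _ | l
  · simp [fAltPreStep, hL]
  · have hne : pre ≠ [] := by intro hc; rw [hc] at hL; simp at hL
    simp only [fAltPreStep, hL]
    split <;> simp [hne]

theorem pre_ne_nil (ns : List Int) (mx : Bool) (js : List Int) (pre : List Int)
    (h : js ≠ [] ∨ pre ≠ []) : js.foldl (fAltPreStep ns mx) pre ≠ [] := by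
  induction js generalizing pre with
  | nil =>
    rcases h with h | h
    · exact absurd rfl h
    · simpa using h
  | cons j js ih =>
    rw [List.foldl_cons]
    exact ih _ (Or.inr (preStep_ne_nil ns mx pre j))

-- the pre-list is a strict chain: every later entry beats every earlier one
theorem pre_pairwise (ns : List Int) (mx : Bool) (js : List Int) (pre : List Int)
    (h : pre.Pairwise (fun a b => fBetter mx (fAltVal ns b) (fAltVal ns a) = true)) :
    (js.foldl (fAltPreStep ns mx) pre).Pairwise
      (fun a b => fBetter mx (fAltVal ns b) (fAltVal ns a) = true) := by
  induction js generalizing pre with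
  | nil => exact h
  | cons j js ih =>
    rw [List.foldl_cons]
    apply ih
    rcases hL : pre.getLast? with _ | l
    · have : pre = [] := List.getLast?_eq_none_iff.mp hL
      subst this
      simp [fAltPreStep]
    · simp only [fAltPreStep, hL]
      split
      next hb =>
        rw [List.pairwise_append]
        refine ⟨h, by simp, ?_⟩
        intro a ha b hb2
        simp only [List.mem_singleton] at hb2
        subst hb2
        rw [fAltBetter_eq] at hb
        rcases List.getLast?_eq_some_iff.mp hL with ⟨pre', rfl⟩
        rcases List.mem_append.mp ha with ha | ha
        · have hla : fBetter mx (fAltVal ns l) (fAltVal ns a) = true := by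
            have := List.pairwise_append.mp h
            exact this.2.2 a ha l (by simp)
          exact fBetter_trans hb hla
        · simp only [List.mem_singleton] at ha
          subst ha
          exact hb
      next => exact h

-- ===== the filter of a chain is B's end-popping =====

theorem pop_eq (ns : List Int) (mx : Bool) (x : Int) (chain : List Int) (head : Int)
    (hh0 : 0 ≤ head) (hhl : head.toNat ≤ chain.length)
    (hpw : (chain.drop head.toNat).Pairwise
      (fun a b => fBetter mx (fAltVal ns a) (fAltVal ns b) = true)) :
    fAltPop ns mx x head chain =
      chain.take head.toNat ++
        (chain.drop head.toNat).filter (fun j => fBetter mx (fAltVal ns j) x) := by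
  induction chain using List.reverseRecOn with
  | nil =>
    rw [fAltPop, dif_neg (by simp)]
    simp
  | append_singleton c a ih =>
    by_cases hfull : head.toNat = c.length + 1
    · -- the live part is empty: the guard head < len fails
      have hlen : ¬ head < ((c ++ [a]).length : Int) := by
        rw [List.length_append, List.length_singleton]; omega
      rw [fAltPop, dif_neg (by tauto)]
      rw [List.take_of_length_le (by rw [List.length_append, List.length_singleton]; omega),
        List.drop_eq_nil_of_le (by rw [List.length_append, List.length_singleton]; omega)]
      simp
    · have hc : head.toNat ≤ c.length := by
        rw [List.length_append, List.length_singleton] at hhl; omega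
      have hdrop : (c ++ [a]).drop head.toNat = c.drop head.toNat ++ [a] :=
        List.drop_append_of_le_length hc
      have htake : (c ++ [a]).take head.toNat = c.take head.toNat :=
        List.take_append_of_le_length hc
      have hlst : (PySem.List.pyGet? (c ++ [a]) (-1)).getD 0 = a := by
        rw [PySem.List.pyGet?_neg_one_append_singleton]; rfl
      by_cases hb : fBetter mx (fAltVal ns a) x = true
      · -- the back beats x: nothing is popped, and by transitivity nothing is filtered
        rw [fAltPop, dif_neg (by
          rw [hlst, fAltBetter_eq]
          simp [hb])]
        rw [htake, hdrop, List.filter_append]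
        rw [List.filter_eq_self.mpr (by
          intro j hj
          show fBetter mx (fAltVal ns j) x = true
          have hja : fBetter mx (fAltVal ns j) (fAltVal ns a) = true := by
            rw [hdrop] at hpw
            exact (List.pairwise_append.mp hpw).2.2 j hj a (by simp)
          exact fBetter_trans hja hb)]
        rw [show [a].filter (fun j => fBetter mx (fAltVal ns j) x) = [a] from by simp [hb]]
        rw [← List.append_assoc, List.take_append_drop]
      · -- the back is displaced: pop it and recurse
        rw [fAltPop, dif_pos (by
          refine ⟨by simp, by rw [List.length_append, List.length_singleton]; omega, ?_⟩
          rw [hlst, fAltBetter_eq]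
          simpa using hb)]
        rw [List.dropLast_concat]
        rw [ih hc (by
          rw [hdrop] at hpw
          exact (List.pairwise_append.mp hpw).1)]
        rw [htake, hdrop, List.filter_append]
        have : [a].filter (fun j => fBetter mx (fAltVal ns j) x) = [] := by
          simp [hb]
        rw [this, List.append_nil]

-- ===== one slide: A's insert is B's loop body =====

-- data is the reversed pair image of the live part of the chain
def liveOf (chain : List Int) (head : Int) : List Int := chain.drop head.toNat

-- the head pointer after the eviction test, and the chain after one loop body
def evH (chain : List Int) (head : Int) (last : Option Int) (i k : Int) : Int :=
  if head < (chain.length : Int) ∧ last = some (i - k) then head + 1 else head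

def newChain (ns : List Int) (mx : Bool) (chain : List Int) (h1 i : Int) : List Int :=
  fAltPop ns mx (fAltVal ns i) h1 chain ++ [i]

theorem reverse_map_getLast (ns : List Int) (j : Int) (l : List Int) :
    (((j :: l).map (pj ns)).reverse).getLast? = some (pj ns j) := by
  rw [List.getLast?_reverse]
  simp

theorem insert_sim (mx : Bool) (ns : List Int) (k : Int) (chain : List Int) (head : Int)
    (last : Option Int) (i : Int)
    (hh0 : 0 ≤ head) (hhl : head.toNat ≤ chain.length)
    (hlive : liveOf chain head ≠ [])
    (hpw : (liveOf chain head).Pairwise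
      (fun a b => fBetter mx (fAltVal ns a) (fAltVal ns b) = true)) :
    fInsert mx k (((liveOf chain head).map (pj ns)).reverse, last) (fAltVal ns i) i =
      (((liveOf (newChain ns mx chain (evH chain head last i k) i)
          (evH chain head last i k)).map (pj ns)).reverse,
       some ((PySem.List.pyGet? (newChain ns mx chain (evH chain head last i k) i)
          (evH chain head last i k)).getD 0)) ∧
    0 ≤ evH chain head last i k ∧
    (evH chain head last i k).toNat ≤ (newChain ns mx chain (evH chain head last i k) i).length ∧
    liveOf (newChain ns mx chain (evH chain head last i k) i) (evH chain head last i k) ≠ [] ∧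
    (liveOf (newChain ns mx chain (evH chain head last i k) i)
      (evH chain head last i k)).Pairwise
      (fun a b => fBetter mx (fAltVal ns a) (fAltVal ns b) = true) ∧
    fGet (((liveOf (newChain ns mx chain (evH chain head last i k) i)
        (evH chain head last i k)).map (pj ns)).reverse) =
      some (fAltVal ns ((PySem.List.pyGet? (newChain ns mx chain (evH chain head last i k) i)
        (evH chain head last i k)).getD 0)) := by
  have hlt : head < (chain.length : Int) := by
    have : head.toNat < chain.length := by
      by_contra hc
      exact hlive (List.drop_eq_nil_of_le (by omega))
    omega
  set h1 := evH chain head last i k with hh1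
  have hh1unf : h1 = if head < (chain.length : Int) ∧ last = some (i - k) then head + 1
      else head := by rw [hh1, evH]
  have hh10 : 0 ≤ h1 := by rw [hh1unf]; split <;> omega
  have hh1l : h1.toNat ≤ chain.length := by
    rw [hh1unf]; split <;> omega
  have hlive1pw : (liveOf chain h1).Pairwise
      (fun a b => fBetter mx (fAltVal ns a) (fAltVal ns b) = true) := by
    rw [hh1unf]
    split
    · have hdd : chain.drop (head + 1).toNat = (chain.drop head.toNat).drop 1 := by
        rw [List.drop_drop]
        congr 1
        omega
      rw [liveOf, hdd]
      exact List.Pairwise.drop hpw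
    · exact hpw
  -- A's d0 after the conditional pop is the pair image of the live part at h1
  have hd0 : (if some (i - k) = last then
        (if (((liveOf chain head).map (pj ns)).reverse) ≠ [] then
          (((liveOf chain head).map (pj ns)).reverse).dropLast
         else (((liveOf chain head).map (pj ns)).reverse))
      else (((liveOf chain head).map (pj ns)).reverse)) =
      ((liveOf chain h1).map (pj ns)).reverse := by
    obtain ⟨a, l, hL⟩ : ∃ a l, liveOf chain head = a :: l := by
      rcases hE : liveOf chain head with _ | ⟨a, l⟩
      · exact absurd hE hlive
      · exact ⟨a, l, rfl⟩
    by_cases hev : last = some (i - k)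
    · have h1eq : h1 = head + 1 := by rw [hh1unf, if_pos ⟨hlt, hev⟩]
      have htail : liveOf chain h1 = l := by
        have hdd : chain.drop (head.toNat + 1) = List.drop 1 (chain.drop head.toNat) := by
          rw [List.drop_drop, Nat.add_comm]
        rw [h1eq, liveOf, show (head + 1).toNat = head.toNat + 1 from by omega, hdd,
          ← liveOf, hL, List.drop_one, List.tail_cons]
      rw [if_pos (by rw [hev]), htail, hL]
      rw [if_pos (by simp), List.map_cons, List.reverse_cons, List.dropLast_concat]
    · have h1eq : h1 = head := by
        rw [hh1unf, if_neg (by intro hc; exact hev hc.2)]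
      rw [if_neg (by intro hc; exact hev hc.symm), h1eq]
  -- A's filter is B's end-popping
  have hfil : (((liveOf chain h1).map (pj ns)).reverse).filter
        (fun y => fBetter mx y.2 (fAltVal ns i)) =
      (((liveOf chain h1).filter (fun j => fBetter mx (fAltVal ns j) (fAltVal ns i))).map
        (pj ns)).reverse := by
    rw [List.filter_reverse, List.filter_map]
    rfl
  have hpop := pop_eq ns mx (fAltVal ns i) chain h1 hh10 hh1l hlive1pw
  set c1 := fAltPop ns mx (fAltVal ns i) h1 chain with hc1
  set lf := (liveOf chain h1).filter (fun j => fBetter mx (fAltVal ns j) (fAltVal ns i))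
    with hlf
  have hc1eq : c1 = chain.take h1.toNat ++ lf := hpop
  have hc1len : h1.toNat ≤ c1.length := by
    rw [hc1eq, List.length_append, List.length_take]
    omega
  set c2 := newChain ns mx chain h1 i with hc2set
  have hc2 : c2 = c1 ++ [i] := by rw [hc2set, newChain, ← hc1]
  have hlive2 : liveOf c2 h1 = lf ++ [i] := by
    rw [liveOf, hc2, hc1eq, List.append_assoc, List.drop_append_of_le_length (by
      rw [List.length_take]; omega), List.drop_eq_nil_of_le (by rw [List.length_take]; omega)]
    simp
  -- all of lf beats the new value, so the extended live part is again a strict chain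
  have hlfbeats : ∀ j ∈ lf, fBetter mx (fAltVal ns j) (fAltVal ns i) = true := by
    intro j hj
    have := List.of_mem_filter hj
    simpa using this
  have hpw2 : (liveOf c2 h1).Pairwise
      (fun a b => fBetter mx (fAltVal ns a) (fAltVal ns b) = true) := by
    rw [hlive2, List.pairwise_append]
    refine ⟨List.Pairwise.filter _ hlive1pw, by simp, ?_⟩
    intro a ha b hb
    simp only [List.mem_singleton] at hb
    subst hb
    exact hlfbeats a ha
  -- the index A stores is exactly chain[head]
  have hhead : (PySem.List.pyGet? c2 h1).getD 0 = (lf ++ [i]).headI := by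
    rw [PySem.List.pyGet?_of_nonneg c2 hh10]
    have : c2[h1.toNat]? = some ((lf ++ [i]).headI) := by
      rw [hc2, hc1eq, List.append_assoc]
      rw [List.getElem?_append_right (by rw [List.length_take]; omega)]
      rw [List.length_take, Nat.min_eq_left hh1l, Nat.sub_self]
      rcases lf with _ | ⟨b, l⟩ <;> simp
    rw [this]
    rfl
  have hlast2 : ((((liveOf c2 h1).map (pj ns)).reverse)).getLast?.map Prod.fst =
      some ((PySem.List.pyGet? c2 h1).getD 0) := by
    rw [hlive2, hhead]
    rcases lf with _ | ⟨b, l⟩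
    · rw [List.nil_append, reverse_map_getLast]
      rfl
    · rw [List.cons_append, reverse_map_getLast]
      rfl
  have hget2 : fGet (((liveOf c2 h1).map (pj ns)).reverse) =
      some (fAltVal ns ((PySem.List.pyGet? c2 h1).getD 0)) := by
    rw [fGet, hlive2, hhead]
    rcases lf with _ | ⟨b, l⟩
    · rw [List.nil_append, reverse_map_getLast]
      rfl
    · rw [List.cons_append, reverse_map_getLast]
      rfl
  have hc2len : h1.toNat ≤ c2.length := by
    rw [hc2, List.length_append, List.length_singleton]
    omega
  have hlive2ne : liveOf c2 h1 ≠ [] := by rw [hlive2]; simp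
  refine ⟨?_, hh10, hc2len, hlive2ne, hpw2, hget2⟩
  rw [fInsert]
  simp only
  rw [hd0, hfil]
  have hd2 : (i, fAltVal ns i) :: ((lf.map (pj ns)).reverse) =
      ((liveOf c2 h1).map (pj ns)).reverse := by
    rw [hlive2, List.map_append, List.reverse_append]
    rfl
  rw [hd2, hlast2]

-- ===== the main loop =====

theorem enumerate_drop_cons (ns : List Int) (a : Nat) (m : Int) (h : a < ns.length) :
    PySem.List.enumerate (ns.drop a) m =
      (m, ns[a]) :: PySem.List.enumerate (ns.drop (a + 1)) (m + 1) := by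
  rw [List.drop_eq_getElem_cons h, PySem.List.enumerate_cons]

theorem altStep_unfold (ns : List Int) (k : Int) (mx : Bool) (chain : List Int)
    (head : Int) (last : Option Int) (out : List Int) (i : Int) :
    fAltStep ns k mx (chain, head, last, out) i =
      (newChain ns mx chain (evH chain head last i k) i, evH chain head last i k,
       some ((PySem.List.pyGet? (newChain ns mx chain (evH chain head last i k) i)
          (evH chain head last i k)).getD 0),
       out ++ [fAltVal ns ((PySem.List.pyGet? (newChain ns mx chain (evH chain head last i k) i)
          (evH chain head last i k)).getD 0)]) := rfl

theorem loop_sim (mx : Bool) (ns : List Int) (k : Int) (K : Nat) (hk : (K : Int) = k) :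
    ∀ (fuel m : Nat), ns.length ≤ K + m + fuel → ∀ (chain : List Int) (head : Int)
      (last : Option Int) (out : List Int),
      0 ≤ head → head.toNat ≤ chain.length → liveOf chain head ≠ [] →
      (liveOf chain head).Pairwise
        (fun a b => fBetter mx (fAltVal ns a) (fAltVal ns b) = true) →
      ((PySem.List.enumerate (ns.drop (K + m)) (↑m)).foldl (fStep mx (↑ns.length) k)
          (((((liveOf chain head).map (pj ns)).reverse), last), out.map some)).2
        = ((PySem.List.pyRange (k + ↑m) (↑ns.length) 1).foldl (fAltStep ns k mx)
            (chain, head, last, out)).2.2.2.map some := by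
  intro fuel
  induction fuel with
  | zero =>
    intro m hm chain head last out _ _ _ _
    rw [List.drop_eq_nil_of_le (by omega), PySem.List.enumerate_nil, List.foldl_nil]
    rw [show PySem.List.pyRange (k + ↑m) (↑ns.length) 1 = [] from by
      apply List.eq_nil_iff_forall_not_mem.mpr
      intro x hx
      rw [PySem.List.mem_pyRange_one] at hx
      omega]
    rw [List.foldl_nil]
  | succ fuel ih =>
    intro m hm chain head last out hh0 hhl hlive hpw
    by_cases hKm : K + m < ns.length
    case neg =>
      rw [List.drop_eq_nil_of_le (by omega), PySem.List.enumerate_nil, List.foldl_nil]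
      rw [show PySem.List.pyRange (k + ↑m) (↑ns.length) 1 = [] from by
        apply List.eq_nil_iff_forall_not_mem.mpr
        intro x hx
        rw [PySem.List.mem_pyRange_one] at hx
        omega]
      rw [List.foldl_nil]
    rw [enumerate_drop_cons ns (K + m) (↑m) hKm, List.foldl_cons]
    have hrange : PySem.List.pyRange (k + ↑m) (↑ns.length) 1 =
        (↑m + k) :: PySem.List.pyRange (k + ↑m + 1) (↑ns.length) 1 := by
      rw [PySem.List.pyRange_one_cons (by omega)]
      rw [show (k + (↑m : Int)) = ↑m + k from by ring]
    rw [hrange, List.foldl_cons]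
    have hguard : ¬ ((↑m : Int) ≥ ↑ns.length - k) := by rw [← hk]; push_cast; omega
    rw [fStep, if_neg (by exact hguard)]
    have hx : ns[K + m] = fAltVal ns (↑m + k) := by
      rw [fAltVal, show ((↑m : Int) + k) = ((K + m : Nat) : Int) from by
          rw [← hk]; push_cast; ring,
        PySem.List.pyGet?_natCast, List.getElem?_eq_getElem hKm]
      rfl
    obtain ⟨hins, hh10, hh1l, hlive2, hpw2, hget2⟩ :=
      insert_sim mx ns k chain head last (↑m + k) hh0 hhl hlive hpw
    simp only
    rw [hx, hins, altStep_unfold]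
    rw [hget2]
    rw [show ∀ (v : Int) (o : List Int), (o.map some) ++ [some v] = (o ++ [v]).map some from by
      intro v o; rw [List.map_append]; rfl]
    rw [show K + m + 1 = K + (m + 1) from by omega,
      show ((↑m : Int) + 1) = ((m + 1 : Nat) : Int) from by push_cast; ring,
      show (k + ↑m + 1 : Int) = k + ((m + 1 : Nat) : Int) from by push_cast; ring]
    exact ih (m + 1) (by omega) _ _ _ _ hh10 hh1l hlive2 hpw2

-- ===== glue: first window, initial state, final minimum =====

theorem enum_take (xs : List Int) (m : Nat) :
    PySem.List.enumerate (xs.take m) 0 = (PySem.List.enumerate xs 0).take m := by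
  by_cases h : m ≤ xs.length
  · conv_rhs => rw [← List.take_append_drop m xs, PySem.List.enumerate_append]
    rw [List.take_left' (by rw [PySem.List.length_enumerate, List.length_take]; omega)]
  · rw [List.take_of_length_le (by omega),
      List.take_of_length_le (by rw [PySem.List.length_enumerate]; omega)]

-- the enumerated first window is the pair image of B's index range
theorem first_window_pairs (ns : List Int) (k : Int) (K : Nat) (hk : (K : Int) = k)
    (hK1 : 1 ≤ K) :
    PySem.List.enumerate (PySem.List.slice ns none (some k)) 0 =
      (PySem.List.pyRange 0 (min k (ns.length : Int)) 1).map (pj ns) := by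
  rw [← hk, PySem.List.slice_to_natCast, ← Nat.cast_min, PySem.List.pyRange_zero_natCast]
  rw [enum_take]
  apply List.ext_getElem
  · simp
  · intro i h1 h2
    have hi : i < min K ns.length := by
      rw [List.length_take, PySem.List.length_enumerate] at h1
      omega
    have hilen : i < ns.length := lt_of_lt_of_le hi (min_le_right _ _)
    simp only [List.getElem_take, PySem.List.getElem_enumerate, List.getElem_map,
      List.getElem_range]
    rw [pj, fAltVal, PySem.List.pyGet?_natCast, List.getElem?_eq_getElem hilen]
    simp

-- A's diff table over option lists is B's zip of the underlying lists
theorem diffs_zip (xs ys : List Int) (h : xs.length = ys.length) :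
    (PySem.List.pyRange 0 (((ys.map some).length : Nat) : Int) 1).map (fun i =>
        (PySem.List.pyGetD (xs.map some) i none).getD 0 -
        (PySem.List.pyGetD (ys.map some) i none).getD 0)
      = (xs.zip ys).map (fun p => p.1 - p.2) := by
  rw [PySem.List.pyRange_zero_natCast, List.map_map]
  apply List.ext_getElem
  · simp [h]
  · intro i h1 h2
    have hi : i < ys.length := by
      rw [List.length_map, List.length_range, List.length_map] at h1
      exact h1
    rw [List.getElem_map, List.getElem_range, List.getElem_map, List.getElem_zip]
    simp only [Function.comp_apply]
    rw [PySem.List.pyGetD_natCast, PySem.List.pyGetD_natCast]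
    rw [List.getD_eq_getElem?_getD, List.getD_eq_getElem?_getD,
      List.getElem?_map, List.getElem?_map,
      List.getElem?_eq_getElem (by omega), List.getElem?_eq_getElem hi]
    rfl

-- B's out lists for the two modes have equal length
theorem altStep_out_len (ns : List Int) (k : Int) (mx : Bool)
    (l : List Int) (st : List Int × Int × Option Int × List Int) :
    (l.foldl (fAltStep ns k mx) st).2.2.2.length = st.2.2.2.length + l.length := by
  induction l generalizing st with
  | nil => simp
  | cons i l ih =>
    rw [List.foldl_cons, ih]
    rw [fAltStep]
    simp only [List.length_append, List.length_cons, List.length_nil]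
    omega

-- the reported list of A's fold equals B's reported list (as options)
theorem reported_sim (mx : Bool) (ns : List Int) (k : Int) (K : Nat) (hk : (K : Int) = k)
    (hK1 : 1 ≤ K) (hne : ns ≠ []) :
    ((PySem.List.enumerate (PySem.List.slice ns (some k) none) 0).foldl
        (fStep mx (↑ns.length) k)
        ((fChainInit mx (PySem.List.enumerate (PySem.List.slice ns none (some k)) 0), none),
         [fGet (fChainInit mx (PySem.List.enumerate (PySem.List.slice ns none (some k)) 0))])).2
      = (fAltReported ns k mx).map some := by
  have hn0 : 0 < ns.length := List.length_pos_iff.mpr hne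
  -- the initial chains
  set js := (PySem.List.pyRange 0 (min k (ns.length : Int)) 1).reverse with hjs
  have hfw := first_window_pairs ns k K hk hK1
  have hjs_ne : js ≠ [] := by
    have h0 : (0 : Int) ∈ PySem.List.pyRange 0 (min k (ns.length : Int)) 1 := by
      rw [PySem.List.mem_pyRange_one]
      constructor
      · omega
      · have : 0 < ns.length := hn0
        omega
    intro hc
    rw [hjs, List.reverse_eq_nil_iff] at hc
    rw [hc] at h0
    simp at h0
  set pre := js.foldl (fAltPreStep ns mx) [] with hpre
  have hinit : fChainInit mx (PySem.List.enumerate (PySem.List.slice ns none (some k)) 0) =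
      pre.map (pj ns) := by
    rw [fChainInit, hfw, ← List.map_reverse, ← hjs]
    have := init_sim mx ns js ([] : List Int)
    simpa using this
  have hpre_ne : pre ≠ [] := pre_ne_nil ns mx js [] (Or.inl hjs_ne)
  have hpre_pw := pre_pairwise ns mx js [] (by simp)
  rw [← hpre] at hpre_pw
  set chain := pre.reverse with hchain
  have hlive0 : liveOf chain 0 = chain := by rw [liveOf]; rfl
  have hchain_ne : chain ≠ [] := by rw [hchain]; simpa using hpre_ne
  have hpw0 : (liveOf chain 0).Pairwise
      (fun a b => fBetter mx (fAltVal ns a) (fAltVal ns b) = true) := by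
    rw [hlive0, hchain, List.pairwise_reverse]
    exact hpre_pw
  have hdata0 : fChainInit mx (PySem.List.enumerate (PySem.List.slice ns none (some k)) 0) =
      ((liveOf chain 0).map (pj ns)).reverse := by
    rw [hinit, hlive0, hchain, List.map_reverse, List.reverse_reverse]
  -- the initial reported value
  have hout0 : fGet (fChainInit mx (PySem.List.enumerate (PySem.List.slice ns none (some k)) 0))
      = some (fAltVal ns ((PySem.List.pyGet? chain 0).getD 0)) := by
    rcases hC : chain with _ | ⟨c0, cr⟩
    · exact absurd hC hchain_ne
    rw [hdata0, hC, hlive0] at *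
    rw [fGet]
    rw [show liveOf (c0 :: cr) 0 = c0 :: cr from rfl]
    rw [reverse_map_getLast]
    rw [PySem.List.pyGet?_zero]
    rfl
  -- the tail of the list A folds over
  have htail : PySem.List.slice ns (some k) none = ns.drop K := by
    rw [← hk, PySem.List.slice_from_natCast]
  rw [htail, hout0, hdata0]
  have hloop := loop_sim mx ns k K hk (ns.length - K) 0 (by omega) chain 0 none
    [fAltVal ns ((PySem.List.pyGet? chain 0).getD 0)]
    (by omega) (by simp) (by rw [hlive0]; exact hchain_ne) hpw0
  rw [show K + 0 = K from rfl] at hloop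
  rw [show ((0 : Nat) : Int) = (0 : Int) from rfl] at hloop
  rw [show (k + (0 : Int)) = k from by ring] at hloop
  rw [show ([fAltVal ns ((PySem.List.pyGet? chain 0).getD 0)]).map some =
    [some (fAltVal ns ((PySem.List.pyGet? chain 0).getD 0))] from rfl] at hloop
  rw [hloop]
  rw [fAltReported]

-- ===== VERDICT (by name: the statement is the Claim_ definition above) =====
theorem f_spec : Claim_equal_f := by
  intro ns k _ hpre
  obtain ⟨hne, hk1⟩ := hpre
  obtain ⟨K, hk⟩ : ∃ K : Nat, (K : Int) = k := ⟨k.toNat, by omega⟩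
  have hK1 : 1 ≤ K := by omega
  show f ns k = f_alt ns k
  rw [f, f_alt]
  rw [reported_sim false ns k K hk hK1 hne, reported_sim true ns k K hk hK1 hne]
  have hlen : (fAltReported ns k true).length = (fAltReported ns k false).length := by
    rw [fAltReported, fAltReported, altStep_out_len, altStep_out_len]
    rfl
  rw [diffs_zip (fAltReported ns k true) (fAltReported ns k false) hlen]
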